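-- pv_equiv track=rewrite | github.com/gyuszix/patio | scrambler_check_two_strings.py | scramble_2
-- ===== SOURCE A (Python) =====
-- def scramble_2(s1, s2):
--     hm_1 = {}
--     hm_2 = {}
--
--     for char in s1:
--         hm_1[char] = hm_1.get(char, 0) + 1
--
--     for char in s2:
--         hm_2[char] = hm_2.get(char, 0) + 1
--
--     for char, count in hm_2.items():
--         if char not in hm_1 or hm_1[char] < count:
--             return False
--
--     return True
-- ===== SOURCE B (Python) =====
-- def scramble_2(s1, s2):
--     budget = {}
--     for ch in s1:
--         budget[ch] = budget.get(ch, 0) + 1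
--     for ch in s2:
--         if budget.get(ch, 0) == 0:
--             return False
--         budget[ch] -= 1
--     return True
-- ===== Notes on version B (the rewrite author's own statement) =====
-- stated objective: alternative
-- what changed: Replaces the two-frequency-maps-plus-comparison-pass shape by a single frequency map of s1 that a one-pass loop over s2 consumes (decrement with early exit on an exhausted budget).
import Mathlib
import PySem

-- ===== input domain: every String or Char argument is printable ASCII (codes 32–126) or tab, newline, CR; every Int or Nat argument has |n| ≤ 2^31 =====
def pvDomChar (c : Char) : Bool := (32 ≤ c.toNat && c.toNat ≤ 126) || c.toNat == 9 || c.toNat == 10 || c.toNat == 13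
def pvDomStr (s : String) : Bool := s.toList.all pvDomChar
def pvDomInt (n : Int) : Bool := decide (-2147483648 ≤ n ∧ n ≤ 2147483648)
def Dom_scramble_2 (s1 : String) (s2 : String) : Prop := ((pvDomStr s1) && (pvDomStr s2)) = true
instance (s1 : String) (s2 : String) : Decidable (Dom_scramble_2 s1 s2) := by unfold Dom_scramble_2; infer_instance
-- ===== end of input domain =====

-- B replaces A's two frequency maps plus a comparison pass by one frequency map of s1
-- consumed in a single decrement-with-early-exit pass over s2 (alternative decomposition).


-- ===== PORT A =====
-- the final 'for char, count in hm_2.items(): if char not in hm_1 or hm_1[char] < count: return False'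
-- (hm_1[char] is read only after 'char in hm_1' holds, so getD 0 is exact there)
def pvCheckItems (hm1 : PySem.Dict Char Int) : List (Char × Int) → Bool
  | [] => true
  | (c, cnt) :: rest =>
    if !(hm1.contains c) || decide (hm1.getD c 0 < cnt) then false
    else pvCheckItems hm1 rest

def scramble_2 (s1 : String) (s2 : String) : Bool :=
  let hm1 := s1.toList.foldl (fun d c => d.insert c (d.getD c 0 + 1)) PySem.Dict.empty
  let hm2 := s2.toList.foldl (fun d c => d.insert c (d.getD c 0 + 1)) PySem.Dict.empty
  pvCheckItems hm1 hm2.items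

-- ===== PORT B =====
-- the consuming loop: 'if budget.get(ch, 0) == 0: return False; budget[ch] -= 1'
def pvConsume (d : PySem.Dict Char Int) : List Char → Bool
  | [] => true
  | c :: rest =>
    if d.getD c 0 == 0 then false
    else pvConsume (d.insert c (d.getD c 0 - 1)) rest

def scramble_2_alt (s1 : String) (s2 : String) : Bool :=
  let budget := s1.toList.foldl (fun d c => d.insert c (d.getD c 0 + 1)) PySem.Dict.empty
  pvConsume budget s2.toList

-- ===== PRECONDITION & SPEC =====
def Spec_scramble_2 (s1 : String) (s2 : String) (out : Bool) : Prop := out = scramble_2_alt s1 s2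
instance (s1 : String) (s2 : String) (out : Bool) : Decidable (Spec_scramble_2 s1 s2 out) := by unfold Spec_scramble_2; infer_instance

-- ===== CLAIM (what is proved, stated in full; the proofs are below) =====
def Claim_equal_scramble_2 : Prop := ∀ (s1 : String) (s2 : String), Dom_scramble_2 s1 s2 → Spec_scramble_2 s1 s2 (scramble_2 s1 s2)

-- ===== LEMMAS AND PROOFS =====

-- A's comparison pass succeeds iff every item passes the check
theorem pvCheckItems_eq_true_iff (hm1 : PySem.Dict Char Int) (items : List (Char × Int)) :
    pvCheckItems hm1 items = true ↔
      ∀ p ∈ items, hm1.contains p.1 = true ∧ ¬ hm1.getD p.1 0 < p.2 := by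
  induction items with
  | nil => simp [pvCheckItems]
  | cons p rest ih =>
    obtain ⟨c, cnt⟩ := p
    simp only [pvCheckItems]
    split_ifs with h
    · simp only [Bool.or_eq_true, Bool.not_eq_true', decide_eq_true_eq] at h
      constructor
      · intro hfalse; cases hfalse
      · intro hall
        have := hall (c, cnt) (by simp)
        rcases h with h | h
        · exact absurd this.1 (by simp [h])
        · exact absurd h this.2
    · simp only [Bool.or_eq_true, Bool.not_eq_true', decide_eq_true_eq, not_or] at h
      rw [ih]
      constructor
      · intro hall q hq
        rcases List.mem_cons.mp hq with rfl | hq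
        · exact ⟨by simpa using h.1, h.2⟩
        · exact hall q hq
      · intro hall q hq
        exact hall q (List.mem_cons_of_mem _ hq)

-- B's consuming pass succeeds iff the dict's budget covers every char's count in l
theorem pvConsume_eq_true_iff (l : List Char) (d : PySem.Dict Char Int)
    (hd : ∀ c : Char, 0 ≤ d.getD c 0) :
    pvConsume d l = true ↔ ∀ c ∈ l, (l.count c : Int) ≤ d.getD c 0 := by
  induction l generalizing d with
  | nil => simp [pvConsume]
  | cons c rest ih =>
    simp only [pvConsume]
    split_ifs with h
    · simp only [beq_iff_eq] at h
      constructor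
      · intro hfalse; cases hfalse
      · intro hall
        have := hall c (by simp)
        rw [List.count_cons_self] at this
        push_cast at this
        omega
    · simp only [beq_iff_eq] at h
      have hpos : 1 ≤ d.getD c 0 := by have := hd c; omega
      have hd' : ∀ x : Char, 0 ≤ (d.insert c (d.getD c 0 - 1)).getD x 0 := by
        intro x
        rw [PySem.Dict.getD_insert]
        split_ifs with hx
        · subst hx; omega
        · exact hd x
      rw [ih _ hd']
      constructor
      · intro hall x hx
        by_cases hxc : x = c
        · subst hxc
          rw [List.count_cons_self]
          by_cases hxr : x ∈ rest
          · have := hall x hxr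
            rw [PySem.Dict.getD_insert, if_pos rfl] at this
            push_cast
            omega
          · rw [List.count_eq_zero_of_not_mem hxr]
            push_cast
            omega
        · have hxr : x ∈ rest := by
            rcases List.mem_cons.mp hx with rfl | hxr
            · exact absurd rfl hxc
            · exact hxr
          have := hall x hxr
          rw [PySem.Dict.getD_insert, if_neg hxc] at this
          rw [List.count_cons_of_ne (Ne.symm hxc)]
          exact this
      · intro hall x hx
        rw [PySem.Dict.getD_insert]
        split_ifs with hxc
        · subst hxc
          have := hall x (by simp)
          rw [List.count_cons_self] at this
          push_cast at this ⊢
          omega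
        · have := hall x (List.mem_cons_of_mem _ hx)
          rw [List.count_cons_of_ne (Ne.symm hxc)] at this
          exact this

-- ===== VERDICT (by name: the statement is the Claim_ definition above) =====
theorem scramble_2_spec : Claim_equal_scramble_2 := by
  intro s1 s2 _
  unfold Spec_scramble_2 scramble_2 scramble_2_alt
  simp only [PySem.Dict.foldl_insert_getD_add_one_eq_counter]
  rw [Bool.eq_iff_iff]
  rw [pvCheckItems_eq_true_iff,
      pvConsume_eq_true_iff _ _ (fun c => by rw [PySem.Dict.getD_counter]; positivity)]
  rw [PySem.Dict.items_counter]
  constructor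
  · intro hall c hc
    obtain ⟨hcon, hlt⟩ := hall (c, (s2.toList.count c : Int))
      (List.mem_map.mpr ⟨c, (PySem.Set.mem_ofList _ _).mpr hc, rfl⟩)
    simp only [PySem.Dict.getD_counter, not_lt] at hlt ⊢
    exact hlt
  · intro hall p hp
    obtain ⟨c, hc, rfl⟩ := List.mem_map.mp hp
    have hc2 : c ∈ s2.toList := (PySem.Set.mem_ofList _ _).mp hc
    have hle := hall c hc2
    rw [PySem.Dict.getD_counter] at hle
    have hpos : 1 ≤ s2.toList.count c := List.count_pos_iff.mpr hc2
    have hpos1 : 1 ≤ s1.toList.count c := by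
      have h1 : (1 : Int) ≤ (s2.toList.count c : Int) := by exact_mod_cast hpos
      have h2 : (1 : Int) ≤ (s1.toList.count c : Int) := by omega
      exact_mod_cast h2
    constructor
    · rw [PySem.Dict.contains_counter]
      exact List.contains_iff_mem.mpr (List.count_pos_iff.mp hpos1)
    · simp only [PySem.Dict.getD_counter, not_lt]
      exact hle
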